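-- pv_equiv track=rewrite | github.com/daniel-reich/turbo-robot | ojNRprg7fKpWJpj47_8.py | shift_sentence
-- ===== SOURCE A (Python) =====
-- def shift_sentence(txt):
--     str=""
--     drk=txt.split()
--     d=[]
--     p=[]
--
--     for i in drk:
--         d.append(i[0])
--         p.append(i[1:])
--     for a in range(len(d)):
--         if a==0:
--             str+=d[-1]+p[a]+""
--
--
--         else:
--             str=str+" "+d[a-1]+p[a]+""
--
--
--     return str
-- ===== SOURCE B (Python) =====
-- def shift_sentence(txt):
--     words = txt.split()
--     if not words:
--         return ""
--     *body, last = words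
--     return last[0] + "".join(w[1:] + " " + w[0] for w in body) + last[1:]
-- ===== Notes on version B (the rewrite author's own statement) =====
-- stated objective: simpler
-- what changed: B emits, for each non-last word, its tail followed by a space and its OWN first letter (each word hands its letter forward to the next), prefixed by the last word's first letter and closed with the last word's tail - no parallel first/rest lists, no index loop with an a==0 wrap case, no rotation.
import Mathlib
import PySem

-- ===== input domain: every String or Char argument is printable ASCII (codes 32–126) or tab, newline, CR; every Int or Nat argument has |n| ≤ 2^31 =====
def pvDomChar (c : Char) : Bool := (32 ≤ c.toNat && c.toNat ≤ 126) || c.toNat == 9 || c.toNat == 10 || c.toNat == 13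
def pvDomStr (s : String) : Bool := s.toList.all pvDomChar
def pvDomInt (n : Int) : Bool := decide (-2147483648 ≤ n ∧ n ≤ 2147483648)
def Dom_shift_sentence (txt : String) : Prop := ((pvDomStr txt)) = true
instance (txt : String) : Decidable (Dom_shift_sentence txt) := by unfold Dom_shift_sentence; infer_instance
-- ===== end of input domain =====

-- B: each non-last word emits its tail, a space and its OWN first letter (handing the letter to
-- the next word); the result is prefixed by the last word's first letter and closed with the
-- last word's tail — no parallel first/rest lists, no index loop with an a==0 case (objective: simpler).

-- ===== PORT A =====
def shift_sentence (txt : String) : String :=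
  let drk := PySem.Chars.split₀ txt.toList
  let dp := drk.foldl
    (fun (st : List (List Char) × List (List Char)) i =>
      (st.1 ++ [[PySem.List.pyGetD i 0 ' ']], st.2 ++ [PySem.List.slice i (some 1) none]))
    ([], [])
  let d := dp.1
  let p := dp.2
  let s := (PySem.List.pyRange 0 (d.length : Int) 1).foldl
    (fun s a =>
      if a = 0 then s ++ PySem.List.pyGetD d (-1) [] ++ PySem.List.pyGetD p a []
      else s ++ [' '] ++ PySem.List.pyGetD d (a - 1) [] ++ PySem.List.pyGetD p a [])
    []
  String.ofList s

-- ===== PORT B =====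
def shift_sentence_alt (txt : String) : String :=
  match PySem.Chars.split₀ txt.toList with
  | [] => ""
  | w :: ws =>
    let last := (w :: ws).getLast (List.cons_ne_nil w ws)
    let body := (w :: ws).dropLast
    String.ofList ([PySem.List.pyGetD last 0 ' ']
      ++ body.flatMap (fun x =>
            PySem.List.slice x (some 1) none ++ [' '] ++ [PySem.List.pyGetD x 0 ' '])
      ++ PySem.List.slice last (some 1) none)

-- ===== PRECONDITION & SPEC =====
def Spec_shift_sentence (txt : String) (out : String) : Prop := out = shift_sentence_alt txt
instance (txt : String) (out : String) : Decidable (Spec_shift_sentence txt out) := by unfold Spec_shift_sentence; infer_instance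

-- ===== CLAIM (what is proved, stated in full; the proofs are below) =====
def Claim_equal_shift_sentence : Prop := ∀ (txt : String), Dom_shift_sentence txt → Spec_shift_sentence txt (shift_sentence txt)

-- ===== LEMMAS AND PROOFS =====

theorem pv_fold_pair {α β γ : Type} (f : α → β) (g : α → γ) (ws : List α) (d0 : List β) (p0 : List γ) :
    ws.foldl (fun st i => (st.1 ++ [f i], st.2 ++ [g i])) (d0, p0) = (d0 ++ ws.map f, p0 ++ ws.map g) := by
  induction ws generalizing d0 p0 with
  | nil => simp
  | cons w ws ih => simp [ih]

theorem pv_range_tail (m : Nat) :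
    PySem.List.pyRange 1 ((m + 1 : Nat) : Int) 1 = (List.range m).map (fun k => ((k + 1 : Nat) : Int)) := by
  have h2 := PySem.List.pyRange_one_append 0 1 ((m + 1 : Nat) : Int) (by norm_num)
    (by exact_mod_cast Nat.succ_le_succ m.zero_le)
  have h01 : PySem.List.pyRange 0 1 1 = [0] := by decide
  rw [PySem.List.pyRange_zero_natCast, List.range_succ_eq_map, h01] at h2
  simp only [List.map_cons, Nat.cast_zero, List.map_map, List.singleton_append] at h2
  exact (List.cons.injEq _ _ _ _ ▸ h2 : _) |>.2.symm

theorem pv_foldl_if (d p : List (List Char)) (l : List Int) (h : ∀ x ∈ l, ¬ x = 0) (init : List Char) :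
    List.foldl (fun s a => if a = 0 then s ++ PySem.List.pyGetD d (-1) [] ++ PySem.List.pyGetD p a []
        else s ++ [' '] ++ PySem.List.pyGetD d (a - 1) [] ++ PySem.List.pyGetD p a []) init l
    = init ++ l.flatMap (fun a => ' ' :: (PySem.List.pyGetD d (a - 1) [] ++ PySem.List.pyGetD p a [])) := by
  rw [PySem.List.foldl_congr_mem l _
      (fun s a => s ++ (' ' :: (PySem.List.pyGetD d (a - 1) [] ++ PySem.List.pyGetD p a [])))
      init ?_]
  · exact PySem.List.foldl_append_eq_flatMap _ l init
  · intro acc x hx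
    rw [if_neg (h x hx)]
    simp

theorem pv_getLast_map {α β : Type} (g : α → β) (l : List α) (h : l ≠ []) (h2 : l.map g ≠ []) :
    (l.map g).getLast h2 = g (l.getLast h) := by
  simp [List.getLast_eq_getElem, List.length_map, List.getElem_map]

-- each word's own letter chained forward equals the index-arithmetic pairing of A
theorem pv_chain (f : List Char → Char) (r : List Char → List Char) :
    ∀ (w : List Char) (ws' : List (List Char)),
    r w ++ (List.range ws'.length).flatMap
        (fun k => ' ' :: (((w :: ws').map (fun i => [f i])).getD k [] ++ ((w :: ws').map r).getD (k + 1) []))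
    = ((w :: ws').dropLast).flatMap (fun x => r x ++ [' ', f x])
        ++ r ((w :: ws').getLast (List.cons_ne_nil w ws')) := by
  intro w ws'
  induction ws' generalizing w with
  | nil => simp
  | cons y t ih =>
    have hlast : (w :: y :: t).getLast (List.cons_ne_nil w (y :: t))
        = (y :: t).getLast (List.cons_ne_nil y t) := List.getLast_cons (List.cons_ne_nil y t)
    rw [List.length_cons, List.range_succ_eq_map, List.flatMap_cons, hlast]
    simp only [List.getD_cons_zero, List.getD_cons_succ, List.map_cons, List.flatMap_map]
    have := ih y
    simp only [List.map_cons, List.getD_cons_succ] at this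
    rw [show (w :: y :: t).dropLast = w :: (y :: t).dropLast from rfl, List.flatMap_cons]
    simp only [List.append_assoc]
    rw [← this]
    simp

theorem pv_main (txt : String) : Spec_shift_sentence txt (shift_sentence txt) := by
  unfold Spec_shift_sentence shift_sentence shift_sentence_alt
  simp only [pv_fold_pair, List.nil_append, List.length_map]
  cases hws : PySem.Chars.split₀ txt.toList with
  | nil => simp [PySem.List.pyRange]
  | cons w ws' =>
    set f : List Char → Char := fun i => PySem.List.pyGetD i 0 ' ' with hf
    set r : List Char → List Char := fun i => PySem.List.slice i (some 1) none with hr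
    simp only [List.length_cons]
    rw [PySem.List.pyRange_one_append 0 1 ((ws'.length + 1 : Nat) : Int) (by norm_num)
        (by exact_mod_cast Nat.succ_le_succ ws'.length.zero_le),
      show PySem.List.pyRange 0 1 1 = [0] from by decide, List.singleton_append, List.foldl_cons,
      if_pos rfl]
    rw [pv_foldl_if _ _ _ (fun x hx => by
        have h1 := (PySem.List.mem_pyRange_one.mp hx).1
        omega) _]
    have hd : PySem.List.pyGetD ((w :: ws').map fun i => [f i]) (-1) []
        = [f ((w :: ws').getLast (List.cons_ne_nil w ws'))] := by
      rw [PySem.List.pyGetD_neg_one _ _ (by simp)]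
      exact pv_getLast_map (fun i => [f i]) (w :: ws') (List.cons_ne_nil w ws') (by simp)
    have hp0 : PySem.List.pyGetD ((w :: ws').map r) 0 [] = r w := by
      simp [List.map_cons, PySem.List.pyGetD_zero_cons]
    rw [hd, hp0, pv_range_tail]
    have hfun : (fun k : Nat => ' ' :: (PySem.List.pyGetD ((w :: ws').map fun i => [f i]) (((k + 1 : Nat) : Int) - 1) []
          ++ PySem.List.pyGetD ((w :: ws').map r) ((k + 1 : Nat) : Int) []))
        = (fun k : Nat => ' ' :: (((w :: ws').map (fun i => [f i])).getD k []
          ++ ((w :: ws').map r).getD (k + 1) [])) := by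
      funext k
      have hc : ((k + 1 : Nat) : Int) - 1 = ((k : Nat) : Int) := by push_cast; ring
      rw [hc, PySem.List.pyGetD_natCast, PySem.List.pyGetD_natCast]
    rw [List.flatMap_map]
    rw [hfun]
    rw [List.nil_append, List.append_assoc, pv_chain f r w ws']
    simp only [List.append_assoc, List.cons_append, List.nil_append]
    rw [hf, hr]

-- ===== VERDICT (by name: the statement is the Claim_ definition above) =====
theorem shift_sentence_spec : Claim_equal_shift_sentence := by
  intro txt _
  exact pv_main txt
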